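-- pv_equiv track=rewrite | github.com/ipaingo/study | python/infsec/infsec 2.py | get_err_codes
-- ===== SOURCE A (Python) =====
-- def get_err_codes(seq):
--     checksums = []
--
--     for i in range(4):
--         p = 2**i
--         tmp = [(j // p) % 2 for j in range(len(seq))]
--         checksums.append(tmp)
--
--     # получаем вектор кода по формуле.
--     parity_bits = [0] * 4
--     for i in range(4):
--         parity_bits[i] = sum([seq[j] * checksums[i][j] for j in range(len(seq))]) % 2
--
--     return parity_bits
-- ===== SOURCE B (Python) =====
-- def get_err_codes(seq):
--     p0 = p1 = p2 = p3 = 0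
--     for j, v in enumerate(seq):
--         if j & 1:
--             p0 += v
--         if j & 2:
--             p1 += v
--         if j & 4:
--             p2 += v
--         if j & 8:
--             p3 += v
--     return [p0 % 2, p1 % 2, p2 % 2, p3 % 2]
-- ===== Notes on version B (the rewrite author's own statement) =====
-- stated objective: simpler
-- what changed: Replaced the precomputed 4xn checksum table and four separate weighted-sum scans by a single pass over enumerate(seq) that distributes each element into four scalar accumulators via bit tests j&1, j&2, j&4, j&8, taking % 2 once at the end.
import Mathlib
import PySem

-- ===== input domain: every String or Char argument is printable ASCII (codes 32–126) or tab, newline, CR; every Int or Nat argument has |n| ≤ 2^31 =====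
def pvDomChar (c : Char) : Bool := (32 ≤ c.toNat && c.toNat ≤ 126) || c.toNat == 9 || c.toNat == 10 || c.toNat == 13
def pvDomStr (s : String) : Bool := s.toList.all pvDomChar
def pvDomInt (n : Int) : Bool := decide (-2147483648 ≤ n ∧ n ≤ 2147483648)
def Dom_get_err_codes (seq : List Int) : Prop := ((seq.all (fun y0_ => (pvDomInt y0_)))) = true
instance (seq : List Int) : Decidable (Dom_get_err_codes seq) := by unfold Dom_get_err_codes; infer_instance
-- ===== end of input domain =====

-- B replaces A's 4×n checksum table and four separate weighted-sum scans by one pass over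
-- enumerate(seq) into four scalar accumulators selected by bit tests j&1, j&2, j&4, j&8 (objective: simpler).

-- ===== PORT A =====
def get_err_codes (seq : List Int) : List Int :=
  let checksums : List (List Int) :=
    (PySem.List.pyRange 0 4 1).foldl (fun cs i =>
      let p : Int := 2 ^ i.toNat
      let tmp : List Int := (PySem.List.pyRange 0 (seq.length : Int) 1).map
        (fun j => PySem.Int.mod (PySem.Int.floordiv j p) 2)
      cs ++ [tmp]) []
  (PySem.List.pyRange 0 4 1).foldl (fun pb i =>
    PySem.List.pySetD pb i
      (PySem.Int.mod (((PySem.List.pyRange 0 (seq.length : Int) 1).map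
        (fun j => PySem.List.pyGetD seq j 0 *
                  PySem.List.pyGetD (PySem.List.pyGetD checksums i []) j 0)).sum) 2))
    [0, 0, 0, 0]

-- ===== PORT B =====
def get_err_codes_alt (seq : List Int) : List Int :=
  let acc := (PySem.List.enumerate seq 0).foldl
    (fun (st : Int × Int × Int × Int) jv =>
      let st := if PySem.Int.band jv.1 1 ≠ 0 then (st.1 + jv.2, st.2.1, st.2.2.1, st.2.2.2) else st
      let st := if PySem.Int.band jv.1 2 ≠ 0 then (st.1, st.2.1 + jv.2, st.2.2.1, st.2.2.2) else st
      let st := if PySem.Int.band jv.1 4 ≠ 0 then (st.1, st.2.1, st.2.2.1 + jv.2, st.2.2.2) else st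
      let st := if PySem.Int.band jv.1 8 ≠ 0 then (st.1, st.2.1, st.2.2.1, st.2.2.2 + jv.2) else st
      st)
    (0, 0, 0, 0)
  [PySem.Int.mod acc.1 2, PySem.Int.mod acc.2.1 2,
   PySem.Int.mod acc.2.2.1 2, PySem.Int.mod acc.2.2.2 2]

-- ===== PRECONDITION & SPEC =====
def Spec_get_err_codes (seq : List Int) (out : List Int) : Prop := out = get_err_codes_alt seq
instance (seq : List Int) (out : List Int) : Decidable (Spec_get_err_codes seq out) := by unfold Spec_get_err_codes; infer_instance

-- ===== CLAIM =====
def Claim_equal_get_err_codes : Prop := ∀ (seq : List Int), Dom_get_err_codes seq → Spec_get_err_codes seq (get_err_codes seq)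

-- ===== LEMMAS AND PROOFS =====

-- seq[j] * ((j // 2^k) % 2)  equals  "seq[j] if bit k of j is set, else 0"  (j ≥ 0)
lemma elem_bridge (k : Nat) (j x : Int) (hj : 0 ≤ j) :
    x * PySem.Int.mod (PySem.Int.floordiv j (2 ^ k)) 2
      = if PySem.Int.band j (2 ^ k) ≠ 0 then x else 0 := by
  lift j to ℕ using hj with m
  have h2 : ((2:Int) ^ k) = ((2 ^ k : Nat) : Int) := by push_cast; ring
  rw [h2, PySem.Int.floordiv_natCast, PySem.Int.band_natCast,
     show (2:Int) = ((2:Nat):Int) from rfl, PySem.Int.mod_natCast]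
  have ht := @Nat.testBit_eq_decide_div_mod_eq k m
  have ha := Nat.and_two_pow m k
  by_cases hb : m.testBit k
  · simp [hb] at ht ha
    rw [ha, ht]
    simp
  · simp [hb] at ht ha
    have h0 : m / 2 ^ k % 2 = 0 := by omega
    rw [ha, h0]
    simp

-- the bit-k-selected sum over the enumerated list
def Tsum (k : Int) (xs : List Int) (s : Int) : Int :=
  ((PySem.List.enumerate xs s).map (fun jv => if PySem.Int.band jv.1 k ≠ 0 then jv.2 else 0)).sum

lemma Tsum_nil (k s : Int) : Tsum k [] s = 0 := by
  simp [Tsum, PySem.List.enumerate_nil]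

lemma Tsum_cons (k x s : Int) (xs : List Int) :
    Tsum k (x :: xs) s = (if PySem.Int.band s k ≠ 0 then x else 0) + Tsum k xs (s + 1) := by
  simp [Tsum, PySem.List.enumerate_cons]

-- invariant of B's single pass: each accumulator collects its bit-selected sum
lemma bfold (xs : List Int) (s a b c d : Int) :
    (PySem.List.enumerate xs s).foldl
      (fun (st : Int × Int × Int × Int) jv =>
        let st := if PySem.Int.band jv.1 1 ≠ 0 then (st.1 + jv.2, st.2.1, st.2.2.1, st.2.2.2) else st
        let st := if PySem.Int.band jv.1 2 ≠ 0 then (st.1, st.2.1 + jv.2, st.2.2.1, st.2.2.2) else st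
        let st := if PySem.Int.band jv.1 4 ≠ 0 then (st.1, st.2.1, st.2.2.1 + jv.2, st.2.2.2) else st
        let st := if PySem.Int.band jv.1 8 ≠ 0 then (st.1, st.2.1, st.2.2.1, st.2.2.2 + jv.2) else st
        st)
      (a, b, c, d)
    = (a + Tsum 1 xs s, b + Tsum 2 xs s, c + Tsum 4 xs s, d + Tsum 8 xs s) := by
  induction xs generalizing s a b c d with
  | nil => simp [Tsum_nil, PySem.List.enumerate_nil]
  | cons x xs ih =>
    rw [PySem.List.enumerate_cons, List.foldl_cons]
    dsimp only
    split_ifs <;>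
      rw [ih, Tsum_cons, Tsum_cons, Tsum_cons, Tsum_cons] <;>
      simp [*, add_assoc]

-- A's i-th weighted sum, with the checksum-table lookup as A performs it
def Ssum (i : Nat) (seq : List Int) : Int :=
  ((PySem.List.pyRange 0 (seq.length : Int) 1).map
    (fun j => PySem.List.pyGetD seq j 0 *
      PySem.List.pyGetD ((PySem.List.pyRange 0 (seq.length : Int) 1).map
        (fun k => PySem.Int.mod (PySem.Int.floordiv k (2 ^ i)) 2)) j 0)).sum

lemma A_eq (seq : List Int) :
    get_err_codes seq = [PySem.Int.mod (Ssum 0 seq) 2, PySem.Int.mod (Ssum 1 seq) 2,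
                         PySem.Int.mod (Ssum 2 seq) 2, PySem.Int.mod (Ssum 3 seq) 2] := by
  unfold get_err_codes Ssum
  rw [show PySem.List.pyRange 0 4 1 = [0, 1, 2, 3] from by decide]
  simp [PySem.List.pySetD, PySem.List.pySet?, PySem.List.pyGetD, PySem.List.pyGet?,
        PySem.List.pyIdx?]

lemma S_eq_T (i : Nat) (seq : List Int) : Ssum i seq = Tsum (2 ^ i) seq 0 := by
  unfold Ssum Tsum
  rw [PySem.List.enumerate_eq_map_pyRange (d := 0), List.map_map]
  refine congrArg List.sum (List.map_congr_left ?_)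
  intro j hj
  have hjm := (PySem.List.mem_pyRange_one).mp hj
  rw [PySem.List.pyGetD_map_pyRange_of_nonneg _ _ _ _ hjm.1 hjm.2]
  simpa using elem_bridge i j (PySem.List.pyGetD seq j 0) hjm.1

lemma B_eq (seq : List Int) :
    get_err_codes_alt seq = [PySem.Int.mod (Tsum 1 seq 0) 2, PySem.Int.mod (Tsum 2 seq 0) 2,
                             PySem.Int.mod (Tsum 4 seq 0) 2, PySem.Int.mod (Tsum 8 seq 0) 2] := by
  unfold get_err_codes_alt
  rw [bfold]
  simp

-- ===== VERDICT =====
theorem get_err_codes_spec : Claim_equal_get_err_codes := by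
  intro seq _
  unfold Spec_get_err_codes
  rw [A_eq, B_eq, S_eq_T, S_eq_T, S_eq_T, S_eq_T]
  norm_num
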